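-- pv_equiv track=rewrite | github.com/mido/mido | mido/backends/rtmidi_utils.py | expand_alsa_port_name
-- ===== SOURCE A (Python) =====
-- def expand_alsa_port_name(port_names, name):
--     """Expand ALSA port name.
--
--     RtMidi/ALSA includes client name and client:port number in
--     the port name, for example:
--
--         TiMidity:TiMidity port 0 128:0
--
--     This allows you to specify only port name or client:port name when
--     opening a port. It will compare the name to each name in
--     port_names (typically returned from get_*_names()) and try these
--     three variants in turn:
--
--         TiMidity:TiMidity port 0 128:0
--         TiMidity:TiMidity port 0
--         TiMidity port 0
--
--     It returns the first match. If no match is found it returns the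
--     passed name so the caller can deal with it.
--     """
--     if name is None:
--         return None
--
--     for port_name in port_names:
--         if name == port_name:
--             return name
--
--         # Try without client and port number (for example 128:0).
--         without_numbers = port_name.rsplit(None, 1)[0]
--         if name == without_numbers:
--             return port_name
--
--         if ':' in without_numbers:
--             without_client = without_numbers.split(':', 1)[1]
--             if name == without_client:
--                 return port_name
--     else:
--         # Let caller deal with it.
--         return name
-- ===== SOURCE B (Python) =====
-- def expand_alsa_port_name(port_names, name):
--     if name is None:
--         return None
--     index = {}
--     for port_name in port_names:
--         index.setdefault(port_name, port_name)
--         parts = port_name.rsplit(None, 1)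
--         if parts:
--             without_numbers = parts[0]
--             index.setdefault(without_numbers, port_name)
--             _head, sep, without_client = without_numbers.partition(':')
--             if sep:
--                 index.setdefault(without_client, port_name)
--     return index.get(name, name)
-- ===== Notes on version B (the rewrite author's own statement) =====
-- stated objective: alternative
-- what changed: Replaces A's per-port early-return scan (three compare-and-return branches per port) by a single pass that builds a first-wins dict from every name variant to its owning port, then answers with one index.get(name, name) lookup.
-- outside the precondition, e.g. on expand_alsa_port_name(['x y', ' '], 'x y'): A returns 'x y', B returns 'x y'; on expand_alsa_port_name(['  '], 'a'): A raises IndexError, B returns 'a'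
import Mathlib
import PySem

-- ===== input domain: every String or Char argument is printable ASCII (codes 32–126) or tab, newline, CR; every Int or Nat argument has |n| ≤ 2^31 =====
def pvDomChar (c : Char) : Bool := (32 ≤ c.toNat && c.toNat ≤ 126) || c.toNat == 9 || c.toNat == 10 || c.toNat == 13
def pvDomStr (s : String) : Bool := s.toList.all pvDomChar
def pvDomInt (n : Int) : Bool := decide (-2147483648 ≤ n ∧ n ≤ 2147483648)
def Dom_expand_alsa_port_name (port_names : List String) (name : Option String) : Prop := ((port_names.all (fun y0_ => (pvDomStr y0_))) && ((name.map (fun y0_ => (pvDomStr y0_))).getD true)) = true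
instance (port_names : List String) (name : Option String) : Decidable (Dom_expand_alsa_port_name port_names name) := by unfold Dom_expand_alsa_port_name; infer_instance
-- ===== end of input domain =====

-- B replaces A's branchy per-port early-return scan by a build-index-then-lookup pass
-- (a dict variant -> first owning port, then one lookup); objective: alternative decomposition.

-- ===== shared helpers: models of the Python string builtins both versions call =====

-- whitespace of str.split()/str.rsplit(); exact on Dom's character set (space, tab, newline, CR)
def pvIsWs (c : Char) : Bool := c == ' ' || c == '\t' || c == '\n' || c == '\r'

-- s.rsplit(None, 1)[0] on the char list; none exactly where the Python raises IndexError
-- (s whitespace-only, so rsplit gives []). Hand-ported: PySem has no rsplit with maxsplit.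
def pvRsplit1Head? (cs : List Char) : Option (List Char) :=
  let r := cs.reverse.dropWhile pvIsWs
  if r.isEmpty then none
  else
    let rest := (r.dropWhile (fun c => !pvIsWs c)).dropWhile pvIsWs
    some (if rest.isEmpty then (r.takeWhile (fun c => !pvIsWs c)).reverse else rest.reverse)

-- the chars after the first ':' — some t iff ':' occurs (A's `':' in s` + `s.split(':', 1)[1]`,
-- B's `s.partition(':')` tail with non-empty sep); hand-ported, exact on every string
def pvAfterColon? (cs : List Char) : Option (List Char) :=
  match cs.dropWhile (fun c => c != ':') with
  | [] => none
  | _ :: t => some t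

-- ===== PORT A =====

-- A's for-loop: exact name, then without_numbers, then without_client, else next port
def pvLoopA (n : List Char) : List String → Option String
  | [] => some (String.ofList n)
  | p :: rest =>
    if n = p.toList then some (String.ofList n)
    else
      match pvRsplit1Head? p.toList with
      | none => none   -- Python raises IndexError here; excluded by Pre_
      | some wn =>
        if n = wn then some p
        else
          match pvAfterColon? wn with
          | some wc => if n = wc then some p else pvLoopA n rest
          | none => pvLoopA n rest

def expand_alsa_port_name (port_names : List String) (name : Option String) : Option String :=
  match name with
  | none => none
  | some s => pvLoopA s.toList port_names

-- ===== PORT B =====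

-- B's loop body: setdefault each variant -> port_name (first port wins)
def pvStep (d : PySem.Dict (List Char) String) (p : String) : PySem.Dict (List Char) String :=
  let d1 := d.setdefault p.toList p
  match pvRsplit1Head? p.toList with
  | none => d1   -- `if parts:` guard: whitespace-only entry contributes only its exact name
  | some wn =>
    let d2 := d1.setdefault wn p
    match pvAfterColon? wn with
    | some wc => d2.setdefault wc p
    | none => d2

def pvBuild (port_names : List String) : PySem.Dict (List Char) String :=
  port_names.foldl pvStep PySem.Dict.empty

def expand_alsa_port_name_alt (port_names : List String) (name : Option String) : Option String :=
  match name with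
  | none => none
  | some s => some ((pvBuild port_names).getD s.toList s)

-- ===== PRECONDITION & SPEC =====
-- Pre_ excludes (unless name is None) lists containing a whitespace-only entry other than name
-- itself: on such entries A's `port_name.rsplit(None, 1)[0]` raises IndexError when the loop
-- reaches them, so Pre_ conservatively keeps all such lists out (even when an earlier entry
-- matches first and A still returns — see the cites in claim.json).
def Pre_expand_alsa_port_name (port_names : List String) (name : Option String) : Prop :=
  name = none ∨ ∀ p ∈ port_names, p.toList.any (fun c => !pvIsWs c) = true ∨ name = some p
instance (port_names : List String) (name : Option String) : Decidable (Pre_expand_alsa_port_name port_names name) := by unfold Pre_expand_alsa_port_name; infer_instance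

def pvWitness_expand_alsa_port_name : List String × Option String :=
  (["TiMidity:TiMidity port 0 128:0"], some "TiMidity port 0")

def Spec_expand_alsa_port_name (port_names : List String) (name : Option String) (out : Option String) : Prop := out = expand_alsa_port_name_alt port_names name
instance (port_names : List String) (name : Option String) (out : Option String) : Decidable (Spec_expand_alsa_port_name port_names name out) := by unfold Spec_expand_alsa_port_name; infer_instance

-- ===== CLAIM (what is proved, stated in full; the proofs are below) =====
def Claim_equal_expand_alsa_port_name : Prop := ∀ (port_names : List String) (name : Option String), Dom_expand_alsa_port_name port_names name → Pre_expand_alsa_port_name port_names name → Spec_expand_alsa_port_name port_names name (expand_alsa_port_name port_names name)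

-- ===== LEMMAS AND PROOFS =====

-- per-port match tried by A, as one function (value = what A returns when this port matches)
def pvMatch? (n : List Char) (p : String) : Option String :=
  if n = p.toList then some p
  else
    match pvRsplit1Head? p.toList with
    | none => none
    | some wn =>
      if n = wn then some p
      else
        match pvAfterColon? wn with
        | some wc => if n = wc then some p else none
        | none => none

lemma rsplit_isSome_of_any (cs : List Char) (h : cs.any (fun c => !pvIsWs c) = true) :
    (pvRsplit1Head? cs).isSome := by
  unfold pvRsplit1Head?
  simp only [List.isEmpty_iff]
  split
  · rename_i hnil
    exfalso
    have hall : ∀ x ∈ cs.reverse, pvIsWs x := by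
      simpa [List.dropWhile_eq_nil_iff] using hnil
    simp only [List.any_eq_true] at h
    obtain ⟨c, hc, hcw⟩ := h
    have := hall c (List.mem_reverse.mpr hc)
    simp [this] at hcw
  · rfl

lemma setdefault_get?_some (d : PySem.Dict (List Char) String) (k n : List Char) (v w : String)
    (hd : d.get? n = some v) : (d.setdefault k w).get? n = some v := by
  by_cases h : n = k
  · subst h; rw [PySem.Dict.get?_setdefault_self, hd]; rfl
  · rw [PySem.Dict.get?_setdefault_of_ne _ _ h]; exact hd

lemma setdefault_get?_none (d : PySem.Dict (List Char) String) (k n : List Char) (w : String)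
    (hk : n ≠ k) (hd : d.get? n = none) : (d.setdefault k w).get? n = none := by
  rw [PySem.Dict.get?_setdefault_of_ne _ _ hk]; exact hd

-- one B-loop step looks up afterwards exactly as A's per-port check
lemma step_lookup (d : PySem.Dict (List Char) String) (p : String) (n : List Char)
    (hd : d.get? n = none) : (pvStep d p).get? n = pvMatch? n p := by
  simp only [pvStep, pvMatch?]
  by_cases h1 : n = p.toList
  · rw [if_pos h1]
    have hd1 : (d.setdefault p.toList p).get? n = some p := by
      rw [h1] at hd ⊢
      rw [PySem.Dict.get?_setdefault_self, hd]; rfl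
    split
    · exact hd1
    · split
      · exact setdefault_get?_some _ _ _ _ _ (setdefault_get?_some _ _ _ _ _ hd1)
      · exact setdefault_get?_some _ _ _ _ _ hd1
  · rw [if_neg h1]
    have hd1 : (d.setdefault p.toList p).get? n = none := setdefault_get?_none _ _ _ _ h1 hd
    split
    · exact hd1
    · rename_i wn hr
      by_cases h2 : n = wn
      · rw [if_pos h2]
        have hd2 : ((d.setdefault p.toList p).setdefault wn p).get? n = some p := by
          rw [h2] at hd1 ⊢
          rw [PySem.Dict.get?_setdefault_self, hd1]; rfl
        split
        · exact setdefault_get?_some _ _ _ _ _ hd2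
        · exact hd2
      · rw [if_neg h2]
        have hd2 : ((d.setdefault p.toList p).setdefault wn p).get? n = none :=
          setdefault_get?_none _ _ _ _ h2 hd1
        split
        · rename_i wc hc
          by_cases h3 : n = wc
          · rw [if_pos h3]
            rw [h3] at hd2 ⊢
            rw [PySem.Dict.get?_setdefault_self, hd2]; rfl
          · rw [if_neg h3]
            exact setdefault_get?_none _ _ _ _ h3 hd2
        · exact hd2

-- a key already bound survives the rest of the build
lemma build_preserved (n : List Char) (v : String) :
    ∀ (ps : List String) (d : PySem.Dict (List Char) String), d.get? n = some v →
      (ps.foldl pvStep d).get? n = some v := by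
  intro ps
  induction ps with
  | nil => intro d hd; simpa using hd
  | cons p rest ih =>
    intro d hd
    have h1 : (pvStep d p).get? n = some v := by
      simp only [pvStep]
      split
      · exact setdefault_get?_some _ _ _ _ _ hd
      · split
        · exact setdefault_get?_some _ _ _ _ _
            (setdefault_get?_some _ _ _ _ _ (setdefault_get?_some _ _ _ _ _ hd))
        · exact setdefault_get?_some _ _ _ _ _ (setdefault_get?_some _ _ _ _ _ hd)
    simpa using ih (pvStep d p) h1

-- A's scan of one port, via pvMatch?
lemma loopA_cons (n : List Char) (p : String) (rest : List String)
    (hp : p.toList.any (fun c => !pvIsWs c) = true ∨ n = p.toList) :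
    pvLoopA n (p :: rest) =
      match pvMatch? n p with
      | some v => some v
      | none => pvLoopA n rest := by
  conv_lhs => rw [pvLoopA]
  simp only [pvMatch?]
  by_cases h1 : n = p.toList
  · simp [h1, String.ofList_toList]
  · have hany : p.toList.any (fun c => !pvIsWs c) = true := by
      rcases hp with h | h
      · exact h
      · exact absurd h h1
    have hsome := rsplit_isSome_of_any p.toList hany
    simp only [if_neg h1]
    cases hr : pvRsplit1Head? p.toList with
    | none => rw [hr] at hsome; simp at hsome
    | some wn =>
      by_cases h2 : n = wn
      · simp [h2]
      · simp only [if_neg h2]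
        cases hc : pvAfterColon? wn with
        | none => simp
        | some wc => by_cases h3 : n = wc <;> simp [h3]

-- main invariant: lookup in the index built from d equals A's remaining scan
lemma build_loop (n : List Char) :
    ∀ (ps : List String) (d : PySem.Dict (List Char) String),
      (∀ p ∈ ps, p.toList.any (fun c => !pvIsWs c) = true ∨ n = p.toList) →
      d.get? n = none →
      some ((ps.foldl pvStep d).getD n (String.ofList n)) = pvLoopA n ps := by
  intro ps
  induction ps with
  | nil =>
    intro d _ hd
    simp [pvLoopA, PySem.Dict.getD_eq_get?_getD, hd]
  | cons p rest ih =>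
    intro d hpre hd
    have hp := hpre p (List.mem_cons_self ..)
    rw [loopA_cons n p rest hp]
    cases hm : pvMatch? n p with
    | some v =>
      have h1 : (pvStep d p).get? n = some v := by rw [step_lookup d p n hd, hm]
      have h2 := build_preserved n v rest (pvStep d p) h1
      simp [List.foldl_cons, PySem.Dict.getD_eq_get?_getD, h2]
    | none =>
      have h1 : (pvStep d p).get? n = none := by rw [step_lookup d p n hd, hm]
      have := ih (pvStep d p) (fun q hq => hpre q (List.mem_cons_of_mem _ hq)) h1
      simpa [List.foldl_cons] using this

-- ===== VERDICT (by name: the statement is the Claim_ definition above) =====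
theorem expand_alsa_port_name_spec : Claim_equal_expand_alsa_port_name := by
  unfold Claim_equal_expand_alsa_port_name
  intro port_names name _hdom hpre
  unfold Spec_expand_alsa_port_name expand_alsa_port_name expand_alsa_port_name_alt
  cases name with
  | none => rfl
  | some s =>
    rcases hpre with h | h
    · exact absurd h (by simp)
    · have hpre' : ∀ p ∈ port_names, p.toList.any (fun c => !pvIsWs c) = true ∨ s.toList = p.toList := by
        intro p hp
        rcases h p hp with h' | h'
        · exact Or.inl h'
        · exact Or.inr (by rw [Option.some_inj.mp h'])
      have := build_loop s.toList port_names PySem.Dict.empty hpre' (PySem.Dict.get?_empty _)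
      rw [String.ofList_toList] at this
      show pvLoopA s.toList port_names = some ((pvBuild port_names).getD s.toList s)
      exact this.symm
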